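-- pv_equiv track=rewrite | github.com/katokta/dicos | dicos_ml.py | saveResults
-- ===== SOURCE A (Python) =====
-- def saveResults(dics): #dics is dictionary
--      """
--      Parameters:
--
--      dics = dictionary filled with raw decision of the classification
--      =============================================
--      Returns : string containing the final decision
--      """
--      val={}
--      results=dics.values()
--      for result in results:
--           if result in val:
--                val[result]+=1
--           else:
--                val[result]=1
--      values=val.values()
--      most=max(val.values())
--      words=[]
--      for k in val:
--           if val[k]==most:
--                words.append(k)
--      label=''
--      for item in words:
--           label+=item
--      return label
-- ===== SOURCE B (Python) =====
-- def saveResults(dics):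
--     # Count label frequencies, then index labels by their count (count -> labels,
--     # first-appearance order), and look the winners up by the maximum count.
--     counts = {}
--     for result in dics.values():
--         counts[result] = counts.get(result, 0) + 1
--     groups = {}
--     for k, c in counts.items():
--         groups[c] = groups.get(c, []) + [k]
--     most = max(counts.values())
--     return ''.join(groups[most])
-- ===== Notes on version B (the rewrite author's own statement) =====
-- stated objective: alternative
-- what changed: Replaces A's max-then-filter scan over the count dict (and its manual string-append loop) with a second index keyed by count (count -> labels in first-appearance order): the winners are obtained by one bucket lookup at the maximum count and joined with ''.join.
import Mathlib
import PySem

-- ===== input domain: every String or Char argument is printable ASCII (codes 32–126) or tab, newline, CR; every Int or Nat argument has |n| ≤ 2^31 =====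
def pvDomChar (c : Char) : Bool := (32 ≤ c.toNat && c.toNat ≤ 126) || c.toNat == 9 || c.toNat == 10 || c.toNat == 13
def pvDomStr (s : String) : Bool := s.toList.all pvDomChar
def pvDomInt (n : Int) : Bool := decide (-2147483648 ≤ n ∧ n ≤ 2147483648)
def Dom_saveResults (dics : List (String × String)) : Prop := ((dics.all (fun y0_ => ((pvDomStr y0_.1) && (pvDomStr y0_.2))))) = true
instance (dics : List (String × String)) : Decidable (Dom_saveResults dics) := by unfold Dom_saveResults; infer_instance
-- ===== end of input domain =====

-- B replaces A's max-then-filter scan with an index keyed by count (count -> labels bucket) and one lookup; same cost, different decomposition.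


-- ===== PORT A =====
def saveResults (dics : List (String × String)) : String :=
  let results := (PySem.Dict.ofList dics).values
  let val : PySem.Dict String Int :=
    results.foldl (fun val result =>
      if val.contains result then val.insert result (val.getD result 0 + 1)
      else val.insert result 1) PySem.Dict.empty
  match PySem.List.max? val.values (fun x => x) with
  | none => ""  -- unreachable under Pre_: max() of the empty sequence raises ValueError
  | some most =>
    let words := val.keys.foldl (fun ws k => if val.getD k 0 == most then ws ++ [k] else ws) ([] : List String)
    -- label += item, ported over List Char (exact)
    String.ofList (words.foldl (fun acc w => acc ++ w.toList) ([] : List Char))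

-- ===== PORT B =====
def saveResults_alt (dics : List (String × String)) : String :=
  let results := (PySem.Dict.ofList dics).values
  let counts : PySem.Dict String Int :=
    results.foldl (fun d r => d.modify r 0 (· + 1)) PySem.Dict.empty
  let groups : PySem.Dict Int (List String) :=
    counts.items.foldl (fun g p => g.modify p.2 [] (· ++ [p.1])) PySem.Dict.empty
  match PySem.List.max? counts.values (fun x => x) with
  | none => ""  -- unreachable under Pre_: max() of the empty sequence raises ValueError
  | some most => PySem.Str.join "" (groups.getD most [])

-- ===== PRECONDITION & SPEC =====
-- A (and B) raise ValueError on the empty dict (max of an empty sequence); Pre_ excludes exactly that input.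
def Pre_saveResults (dics : List (String × String)) : Prop := dics ≠ []
instance (dics : List (String × String)) : Decidable (Pre_saveResults dics) := by unfold Pre_saveResults; infer_instance
def pvWitness_saveResults : (List (String × String)) := [("a", "x")]
def Spec_saveResults (dics : List (String × String)) (out : String) : Prop := out = saveResults_alt dics
instance (dics : List (String × String)) (out : String) : Decidable (Spec_saveResults dics out) := by unfold Spec_saveResults; infer_instance

-- ===== CLAIM (what is proved, stated in full; the proofs are below) =====
def Claim_equal_saveResults : Prop := ∀ (dics : List (String × String)), Dom_saveResults dics → Pre_saveResults dics → Spec_saveResults dics (saveResults dics)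

-- ===== LEMMAS AND PROOFS =====

lemma countA_eq_counter (l : List String) :
    l.foldl (fun val result =>
      if val.contains result then val.insert result (val.getD result 0 + 1)
      else val.insert result 1) PySem.Dict.empty = PySem.Dict.counter l := by
  rw [← PySem.Dict.foldl_insert_getD_add_one_eq_counter]
  suffices h : ∀ (d : PySem.Dict String Int),
      l.foldl (fun val result =>
        if val.contains result then val.insert result (val.getD result 0 + 1)
        else val.insert result 1) d = l.foldl (fun d r => d.insert r (d.getD r 0 + 1)) d from h _
  induction l with
  | nil => intro d; rfl
  | cons x t ih =>
    intro d
    simp only [List.foldl]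
    rw [ih]
    congr 1
    cases hc : d.contains x
    · simp [PySem.Dict.getD_of_not_contains d 0 hc]
    · simp

lemma join_empty_eq (parts : List String) :
    PySem.Str.join "" parts = String.ofList (parts.foldl (fun acc w => acc ++ w.toList) []) := by
  rw [PySem.List.foldl_append_eq_flatMap]
  have h : ∀ xss : List (List Char), PySem.Chars.join [] xss = xss.flatten := by
    intro xss
    induction xss with
    | nil => simp [PySem.Chars.join, List.intercalate]
    | cons x t ih =>
      cases t <;> simp_all [PySem.Chars.join, List.intercalate]
  apply String.toList_injective
  simp [PySem.Str.join, h, List.flatMap]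

lemma winners_eq (cnt : PySem.Dict String Int) (hnd : cnt.keys.Nodup) (most : Int) :
    (cnt.items.foldl (fun g p => g.modify p.2 [] (· ++ [p.1]))
        (PySem.Dict.empty : PySem.Dict Int (List String))).getD most []
      = cnt.keys.filter (fun k => cnt.getD k 0 == most) := by
  have hswap : cnt.items.foldl (fun g p => g.modify p.2 [] (· ++ [p.1]))
        (PySem.Dict.empty : PySem.Dict Int (List String))
      = (cnt.items.map (fun p => (p.2, p.1))).foldl
          (fun g p => g.modify p.1 [] (· ++ [p.2])) PySem.Dict.empty := by
    rw [List.foldl_map]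
  rw [hswap, PySem.Dict.getD_foldl_modify_append,
      PySem.Dict.items_eq_map_keys cnt hnd 0]
  simp [List.filter_map, Function.comp_def]

-- ===== VERDICT (by name: the statement is the Claim_ definition above) =====
theorem saveResults_spec : Claim_equal_saveResults := by
  intro dics _ _
  unfold Spec_saveResults saveResults saveResults_alt
  simp only [countA_eq_counter, PySem.Dict.counter_eq_foldl]
  rw [← PySem.Dict.counter_eq_foldl]
  cases hmax : PySem.List.max? (PySem.Dict.counter (PySem.Dict.ofList dics).values).values (fun x => x) with
  | none => rfl
  | some most =>
    change String.ofList _ = PySem.Str.join _ _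
    rw [PySem.List.foldl_append_if
          (p := fun k => (PySem.Dict.counter (PySem.Dict.ofList dics).values).getD k 0 == most)
          (f := fun k => k),
        winners_eq _ (PySem.Dict.nodup_keys_counter _) most, join_empty_eq]
    simp
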